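-- pv_equiv track=rewrite | github.com/1323018058-commits/xiaohei | packages/db/scripts/smoke_listing_category_match.py | translate_category_paths
-- ===== SOURCE A (Python) =====
-- def translate_category_paths(paths: list[str]) -> dict[str, str]:
--     translations: dict[str, str] = {}
--     for path in paths:
--         if "Coffee Machines" in path:
--             translations[path] = "家居 > 小家电 > 厨房电器 > 热饮机 > 咖啡机"
--         elif "Air Fryers" in path:
--             translations[path] = "家居 > 小家电 > 厨房电器 > 空气炸锅"
--         elif "Cat Litter Boxes" in path:
--             translations[path] = "家庭 > 宠物 > 猫用品 > 猫砂盆"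
--     return translations
-- ===== SOURCE B (Python) =====
-- TABLE = [
--     ("Coffee Machines", "家居 > 小家电 > 厨房电器 > 热饮机 > 咖啡机"),
--     ("Air Fryers", "家居 > 小家电 > 厨房电器 > 空气炸锅"),
--     ("Cat Litter Boxes", "家庭 > 宠物 > 猫用品 > 猫砂盆"),
-- ]
--
--
-- def translate_category_paths(paths: list[str]) -> dict[str, str]:
--     # Phase 1: category-major staged passes — each table entry, in priority
--     # order, claims every still-unclaimed path it matches.
--     matched: dict[str, str] = {}
--     for sub, trans in TABLE:
--         for p in paths:
--             if sub in p and p not in matched: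
--                 matched[p] = trans
--     # Phase 2: re-emit in original path order (earlier entries' priority is
--     # already settled, so only the ordering pass remains).
--     return {p: matched[p] for p in paths if p in matched}
-- ===== Notes on version B (the rewrite author's own statement) =====
-- stated objective: alternative
-- what changed: Replaces A's single path-major pass with an if/elif cascade by a two-phase, category-major algorithm: each table entry in priority order claims all still-unclaimed matching paths into a dict, then a final ordering pass rebuilds the result in original path order.
import Mathlib
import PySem

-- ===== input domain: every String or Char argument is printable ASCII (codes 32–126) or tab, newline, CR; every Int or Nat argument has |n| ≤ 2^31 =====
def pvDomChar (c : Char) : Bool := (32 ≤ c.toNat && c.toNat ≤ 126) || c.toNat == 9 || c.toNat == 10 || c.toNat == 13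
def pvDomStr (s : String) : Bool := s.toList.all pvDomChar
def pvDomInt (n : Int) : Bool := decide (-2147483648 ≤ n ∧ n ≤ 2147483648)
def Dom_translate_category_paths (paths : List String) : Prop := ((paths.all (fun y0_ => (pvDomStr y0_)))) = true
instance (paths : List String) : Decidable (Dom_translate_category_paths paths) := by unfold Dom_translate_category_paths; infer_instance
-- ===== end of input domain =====

-- B replaces A's single path-major pass (if/elif cascade) by a two-phase, category-major
-- algorithm: staged passes per table entry, then an ordering pass over the paths.

-- ===== PORT A =====
def translate_category_paths (paths : List String) : List (String × String) :=
  (paths.foldl (fun (translations : PySem.Dict String String) path =>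
    if PySem.Str.isIn "Coffee Machines" path then
      translations.insert path "家居 > 小家电 > 厨房电器 > 热饮机 > 咖啡机"
    else if PySem.Str.isIn "Air Fryers" path then
      translations.insert path "家居 > 小家电 > 厨房电器 > 空气炸锅"
    else if PySem.Str.isIn "Cat Litter Boxes" path then
      translations.insert path "家庭 > 宠物 > 猫用品 > 猫砂盆"
    else translations) PySem.Dict.empty).items

-- ===== PORT B =====
def pvTable : List (String × String) :=
  [("Coffee Machines", "家居 > 小家电 > 厨房电器 > 热饮机 > 咖啡机"),
   ("Air Fryers", "家居 > 小家电 > 厨房电器 > 空气炸锅"),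
   ("Cat Litter Boxes", "家庭 > 宠物 > 猫用品 > 猫砂盆")]

-- Phase 1: category-major staged passes.
def pvMatched (paths : List String) : PySem.Dict String String :=
  pvTable.foldl (fun matched e =>
    paths.foldl (fun matched p =>
      if PySem.Str.isIn e.1 p && !(matched.contains p) then matched.insert p e.2
      else matched) matched) PySem.Dict.empty

-- Phase 2: re-emit in original path order ({p: matched[p] for p in paths if p in matched}).
def translate_category_paths_alt (paths : List String) : List (String × String) :=
  (paths.foldl (fun (d : PySem.Dict String String) p =>
    match (pvMatched paths).get? p with
    | some t => d.insert p t
    | none => d) PySem.Dict.empty).items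

-- ===== PRECONDITION & SPEC =====
def Spec_translate_category_paths (paths : List String) (out : List (String × String)) : Prop :=
  out = translate_category_paths_alt paths
instance (paths : List String) (out : List (String × String)) :
    Decidable (Spec_translate_category_paths paths out) := by
  unfold Spec_translate_category_paths; infer_instance

-- ===== CLAIM =====
def Claim_equal_translate_category_paths : Prop :=
  ∀ (paths : List String), Dom_translate_category_paths paths →
    Spec_translate_category_paths paths (translate_category_paths paths)

-- ===== LEMMAS AND PROOFS =====
-- One stage of phase 1: its effect on any single lookup.
lemma pv_stage_get? (sub trans : String) (paths : List String)
    (m : PySem.Dict String String) (q : String) :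
    (paths.foldl (fun matched p =>
      if PySem.Str.isIn sub p && !(matched.contains p) then matched.insert p trans
      else matched) m).get? q
    = if q ∈ paths ∧ PySem.Str.isIn sub q = true ∧ m.get? q = none then some trans
      else m.get? q := by
  induction paths generalizing m with
  | nil => simp
  | cons p ps ih =>
    simp only [List.foldl_cons, ih, List.mem_cons]
    rw [PySem.Dict.contains_eq_isSome_get? m p]
    clear ih
    by_cases hqp : q = p
    · subst hqp
      by_cases hs : PySem.Str.isIn sub q = true <;>
        cases hmq : m.get? q <;>
          simp_all [PySem.Dict.get?_insert_self]
    · by_cases hs : PySem.Str.isIn sub p = true <;>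
        cases hmp : m.get? p <;>
          simp_all [PySem.Dict.get?_insert_of_ne _ _ hqp]

-- Phase-1 lookups realise A's if/elif priority for every path in the list (and miss otherwise).
lemma pv_matched_get? (paths : List String) (q : String) :
    (pvMatched paths).get? q
    = if q ∈ paths then
        (if PySem.Str.isIn "Coffee Machines" q then some "家居 > 小家电 > 厨房电器 > 热饮机 > 咖啡机"
         else if PySem.Str.isIn "Air Fryers" q then some "家居 > 小家电 > 厨房电器 > 空气炸锅"
         else if PySem.Str.isIn "Cat Litter Boxes" q then some "家庭 > 宠物 > 猫用品 > 猫砂盆"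
         else none)
      else none := by
  unfold pvMatched pvTable
  simp only [List.foldl_cons, List.foldl_nil]
  rw [pv_stage_get?, pv_stage_get?, pv_stage_get?]
  by_cases hq : q ∈ paths <;>
    by_cases h1 : PySem.Str.isIn "Coffee Machines" q = true <;>
      by_cases h2 : PySem.Str.isIn "Air Fryers" q = true <;>
        by_cases h3 : PySem.Str.isIn "Cat Litter Boxes" q = true <;>
          simp_all

-- ===== VERDICT =====
theorem translate_category_paths_spec : Claim_equal_translate_category_paths := by
  intro paths _
  unfold Spec_translate_category_paths translate_category_paths translate_category_paths_alt
  congr 1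
  apply Eq.symm
  apply PySem.List.foldl_congr_mem
  intro acc p hp
  rw [pv_matched_get? paths p]
  by_cases h1 : PySem.Str.isIn "Coffee Machines" p = true <;>
    by_cases h2 : PySem.Str.isIn "Air Fryers" p = true <;>
      by_cases h3 : PySem.Str.isIn "Cat Litter Boxes" p = true <;>
        simp_all
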